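-- pv_equiv track=rewrite | github.com/kelvinhuang0327/number-pattern-research | tools/backtest_539_review.py | feat_gap
-- ===== SOURCE A (Python) =====
-- MAX_NUM = 39
--
-- PICK = 5
--
-- def feat_gap(history, k=PICK):
--     last_seen = {}
--     for i, d in enumerate(history):
--         for n in d['numbers']: last_seen[n] = i
--     current = len(history)
--     scores = {n: current - last_seen.get(n, -1) for n in range(1, MAX_NUM+1)}
--     ranked = sorted(scores, key=lambda x: -scores[x])
--     return sorted(ranked[:k])
-- ===== SOURCE B (Python) =====
-- MAX_NUM = 39
--
-- PICK = 5
--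
-- def feat_gap(history, k=PICK):
--     # Backward scan: the first time a number in 1..39 is seen from the end,
--     # its last_seen index is final; stop early once all 39 are determined.
--     last_seen = {}
--     remaining = set(range(1, MAX_NUM + 1))
--     for i, d in reversed(list(enumerate(history))):
--         if not remaining:
--             break
--         for n in d['numbers']:
--             if n in remaining:
--                 remaining.discard(n)
--                 last_seen[n] = i
--     # gap = len(history) - last_seen is a decreasing function of last_seen, so
--     # ranking by descending gap (ties to the smaller number, as A's stable sort
--     # over ascending keys does) is ranking by the lexicographic key (last_seen, n).
--     ranked = sorted(range(1, MAX_NUM + 1), key=lambda n: (last_seen.get(n, -1), n))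
--     return sorted(ranked[:k])
-- ===== Notes on version B (the rewrite author's own statement) =====
-- stated objective: alternative
-- what changed: Replaces A's forward overwrite-everything pass over all draws with a backward scan that fixes each number's last_seen at its first occurrence from the end and breaks once all 39 are determined, and replaces A's sort by negated gap over the scores dict with a lexicographic (last_seen, n) sort over 1..39.
import Mathlib
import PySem

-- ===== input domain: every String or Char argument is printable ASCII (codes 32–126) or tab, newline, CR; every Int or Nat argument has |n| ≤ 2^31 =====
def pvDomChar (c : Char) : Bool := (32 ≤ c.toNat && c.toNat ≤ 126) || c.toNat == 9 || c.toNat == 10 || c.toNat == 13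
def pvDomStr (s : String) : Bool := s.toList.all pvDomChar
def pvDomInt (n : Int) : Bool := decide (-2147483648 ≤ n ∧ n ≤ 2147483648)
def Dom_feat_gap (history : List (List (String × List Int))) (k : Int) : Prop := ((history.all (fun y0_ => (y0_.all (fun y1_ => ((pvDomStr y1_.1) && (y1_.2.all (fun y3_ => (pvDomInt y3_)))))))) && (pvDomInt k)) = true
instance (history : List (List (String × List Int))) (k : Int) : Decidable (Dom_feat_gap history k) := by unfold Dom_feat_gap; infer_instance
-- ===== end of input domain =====

-- B replaces A's forward overwrite pass with a backward early-breaking scan and a lexicographic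
-- (last_seen, n) sort over 1..39 instead of A's negated-gap sort over the scores dict (alternative
-- decomposition, same worst-case cost; equal return value wherever A returns).


-- ===== PORT A =====
-- d['numbers']; the default [] is only reached outside Pre_feat_gap (KeyError in Python)
def pyNums (d : List (String × List Int)) : List Int :=
  PySem.Dict.getD ⟨d⟩ "numbers" []

-- A's loop: 'for i, d in enumerate(history): for n in d['numbers']: last_seen[n] = i'
def aLastSeen (history : List (List (String × List Int))) : PySem.Dict Int Int :=
  (PySem.List.enumerate history 0).foldl
    (fun ls p => (pyNums p.2).foldl (fun ls n => ls.insert n p.1) ls)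
    PySem.Dict.empty

def feat_gap (history : List (List (String × List Int))) (k : Int) : List Int :=
  let last_seen := aLastSeen history
  let current : Int := history.length
  let scores : PySem.Dict Int Int :=
    (PySem.List.pyRange 1 40 1).foldl
      (fun sc n => sc.insert n (current - last_seen.getD n (-1))) PySem.Dict.empty
  let ranked := PySem.List.sorted scores.keys (fun x => -(scores.getD x 0)) false
  PySem.List.sorted (PySem.List.slice ranked none (some k)) (fun x => x) false

-- ===== PORT B =====
-- B's inner loop: 'for n in d['numbers']: if n in remaining: remaining.discard(n); last_seen[n] = i'
def bStep (i : Int) (nums : List Int) (st : PySem.Set Int × PySem.Dict Int Int) :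
    PySem.Set Int × PySem.Dict Int Int :=
  nums.foldl (fun st n =>
    if PySem.Set.contains st.1 n then (PySem.Set.discard st.1 n, st.2.insert n i) else st) st

-- B's outer loop: 'for i, d in reversed(list(enumerate(history))): if not remaining: break; …'
def bLoop : List (Int × List (String × List Int)) → PySem.Set Int × PySem.Dict Int Int → PySem.Dict Int Int
  | [], st => st.2
  | (i, d) :: rest, st => if st.1.isEmpty then st.2 else bLoop rest (bStep i (pyNums d) st)

def feat_gap_alt (history : List (List (String × List Int))) (k : Int) : List Int :=
  let st0 : PySem.Set Int × PySem.Dict Int Int :=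
    (PySem.Set.ofList (PySem.List.pyRange 1 40 1), PySem.Dict.empty)
  let last_seen := bLoop (PySem.List.enumerate history 0).reverse st0
  let ranked := PySem.List.sorted2 (PySem.List.pyRange 1 40 1)
      (fun n => last_seen.getD n (-1)) (fun n => n) false
  PySem.List.sorted (PySem.List.slice ranked none (some k)) (fun x => x) false

-- ===== PRECONDITION & SPEC =====
-- Pre_ excludes exactly the inputs where Python's d['numbers'] raises KeyError (a draw without that key)
def Pre_feat_gap (history : List (List (String × List Int))) (k : Int) : Prop :=
  ∀ d ∈ history, (PySem.Dict.mk d).contains "numbers" = true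
instance (history : List (List (String × List Int))) (k : Int) : Decidable (Pre_feat_gap history k) := by unfold Pre_feat_gap; infer_instance

def pvWitness_feat_gap : (List (List (String × List Int))) × Int :=
  ([[("numbers", [3, 7])], [("numbers", [3])]], 5)

def Spec_feat_gap (history : List (List (String × List Int))) (k : Int) (out : List Int) : Prop := out = feat_gap_alt history k
instance (history : List (List (String × List Int))) (k : Int) (out : List Int) : Decidable (Spec_feat_gap history k out) := by unfold Spec_feat_gap; infer_instance

-- ===== CLAIM (what is proved, stated in full; the proofs are below) =====
def Claim_equal_feat_gap : Prop := ∀ (history : List (List (String × List Int))) (k : Int), Dom_feat_gap history k → Pre_feat_gap history k → Spec_feat_gap history k (feat_gap history k)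

-- ===== LEMMAS AND PROOFS =====

-- A's inner loop maps every n in nums to i (the same i for every occurrence)
theorem innerA_get? (i : Int) : ∀ (nums : List Int) (ls : PySem.Dict Int Int) (n : Int),
    ((nums.foldl (fun ls m => ls.insert m i) ls).get? n) = if n ∈ nums then some i else ls.get? n := by
  intro nums
  induction nums with
  | nil => intro ls n; simp
  | cons x t ih =>
    intro ls n
    simp only [List.foldl_cons, ih, List.mem_cons, PySem.Dict.get?_insert]
    by_cases hx : n = x <;> by_cases hm : n ∈ t <;> simp [hx, hm]

theorem aLast_nil (n : Int) : (aLastSeen []).get? n = none := by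
  simp [aLastSeen, PySem.List.enumerate_nil]

theorem aLast_snoc (hs : List (List (String × List Int))) (d : List (String × List Int)) (n : Int) :
    (aLastSeen (hs ++ [d])).get? n =
      if n ∈ pyNums d then some (hs.length : Int) else (aLastSeen hs).get? n := by
  unfold aLastSeen
  rw [PySem.List.enumerate_append, List.foldl_append]
  simp [PySem.List.enumerate_cons, PySem.List.enumerate_nil, innerA_get?]

-- the scores-dict comprehension: keys in insertion order, values by the formula
theorem dictOf_spec (f : Int → Int) : ∀ (l : List Int), l.Nodup →
    ((l.foldl (fun sc n => sc.insert n (f n)) PySem.Dict.empty).keys = l ∧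
     ∀ n : Int, (l.foldl (fun sc n => sc.insert n (f n)) PySem.Dict.empty).get? n
        = if n ∈ l then some (f n) else none) := by
  intro l
  induction l using List.reverseRecOn with
  | nil =>
    intro _
    exact ⟨by simp [PySem.Dict.keys, PySem.Dict.empty], fun n => by simp [PySem.Dict.get?_empty]⟩
  | append_singleton t x ih =>
    intro hnd
    have hnd' := hnd
    rw [List.nodup_append] at hnd'
    obtain ⟨h1, _, h3⟩ := hnd'
    have hx : x ∉ t := fun hm => h3 x hm x (by simp) rfl
    obtain ⟨hk, hg⟩ := ih h1
    rw [List.foldl_append]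
    simp only [List.foldl_cons, List.foldl_nil]
    have hcon : (t.foldl (fun sc n => sc.insert n (f n)) PySem.Dict.empty).contains x = false := by
      rw [Bool.eq_false_iff]
      intro hc
      exact hx (hk ▸ (PySem.Dict.contains_iff_mem_keys _ x).mp hc)
    constructor
    · rw [PySem.Dict.keys_insert_of_not_contains _ _ hcon, hk]
    · intro n
      rw [PySem.Dict.get?_insert, hg]
      by_cases hxn : n = x <;> by_cases hm : n ∈ t <;> simp_all

theorem contains_discard (s : PySem.Set Int) (x n : Int) :
    PySem.Set.contains (PySem.Set.discard s x) n = (PySem.Set.contains s n && !(n == x)) := by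
  simp [PySem.Set.contains, PySem.Set.discard, List.mem_filter]
  by_cases h1 : n ∈ s <;> by_cases h2 : n = x <;> simp [h1, h2]

theorem bStep_fst (i : Int) : ∀ (nums : List Int) (st : PySem.Set Int × PySem.Dict Int Int) (n : Int),
    PySem.Set.contains (bStep i nums st).1 n
      = (PySem.Set.contains st.1 n && !(decide (n ∈ nums))) := by
  intro nums
  induction nums with
  | nil => intro st n; simp [bStep]
  | cons x t ih =>
    intro st n
    have hstep : bStep i (x :: t) st
        = bStep i t (if PySem.Set.contains st.1 x then (PySem.Set.discard st.1 x, st.2.insert x i) else st) := by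
      simp [bStep]
    rw [hstep, ih]
    by_cases hx : PySem.Set.contains st.1 x = true
    · simp only [hx, if_true, contains_discard]
      by_cases h2 : n = x <;> by_cases hm : n ∈ t <;> simp [h2, hm]
    · simp only [Bool.not_eq_true] at hx
      simp only [hx, Bool.false_eq_true, if_false]
      by_cases h2 : n = x <;> by_cases hm : n ∈ t <;> simp [h2, hm] <;> simp_all

theorem bStep_snd (i : Int) : ∀ (nums : List Int) (st : PySem.Set Int × PySem.Dict Int Int) (n : Int),
    (bStep i nums st).2.get? n
      = if PySem.Set.contains st.1 n = true ∧ n ∈ nums then some i else st.2.get? n := by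
  intro nums
  induction nums with
  | nil => intro st n; simp [bStep]
  | cons x t ih =>
    intro st n
    have hstep : bStep i (x :: t) st
        = bStep i t (if PySem.Set.contains st.1 x then (PySem.Set.discard st.1 x, st.2.insert x i) else st) := by
      simp [bStep]
    rw [hstep, ih]
    by_cases hx : PySem.Set.contains st.1 x = true
    · simp only [hx, if_true, contains_discard]
      by_cases h2 : n = x <;> by_cases hm : n ∈ t <;>
        simp [h2, hm, PySem.Dict.get?_insert] <;> simp_all
    · simp only [Bool.not_eq_true] at hx
      simp only [hx, Bool.false_eq_true, if_false]
      by_cases h2 : n = x <;> by_cases hm : n ∈ t <;> simp [h2, hm] <;> simp_all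

-- B's backward loop computes A's last_seen on the numbers still in `remaining`
theorem bLoop_get? : ∀ (hs : List (List (String × List Int))) (rem : PySem.Set Int)
    (ls : PySem.Dict Int Int) (n : Int),
    (bLoop (PySem.List.enumerate hs 0).reverse (rem, ls)).get? n
      = if PySem.Set.contains rem n = true
          then ((aLastSeen hs).get? n).or (ls.get? n) else ls.get? n := by
  intro hs
  induction hs using List.reverseRecOn with
  | nil =>
    intro rem ls n
    simp [PySem.List.enumerate_nil, bLoop, aLast_nil]
  | append_singleton t d ih =>
    intro rem ls n
    rw [PySem.List.enumerate_append, PySem.List.enumerate_cons, PySem.List.enumerate_nil,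
      List.reverse_append]
    simp only [List.reverse_cons, List.reverse_nil, List.nil_append, List.cons_append, zero_add]
    show (bLoop ((↑t.length, d) :: (PySem.List.enumerate t 0).reverse) (rem, ls)).get? n = _
    rw [bLoop]
    by_cases hemp : rem.isEmpty = true
    · rcases List.isEmpty_iff.mp hemp with rfl
      simp [PySem.Set.contains]
    · have hpair : bStep (↑t.length) (pyNums d) (rem, ls)
          = ((bStep (↑t.length) (pyNums d) (rem, ls)).1, (bStep (↑t.length) (pyNums d) (rem, ls)).2) := rfl
      rw [if_neg hemp, hpair, ih, bStep_fst, bStep_snd, aLast_snoc]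
      by_cases hc : PySem.Set.contains rem n = true <;> by_cases hm : n ∈ pyNums d <;>
        simp [hc, hm]

theorem insertBy_congr (b1 b2 : Int → Int → Bool) (x : Int) :
    ∀ (ys : List Int), (∀ y ∈ ys, b1 x y = b2 x y) →
      PySem.List.insertBy b1 x ys = PySem.List.insertBy b2 x ys := by
  intro ys
  induction ys with
  | nil => intro _; rfl
  | cons y t ih =>
    intro h
    simp only [PySem.List.insertBy]
    rw [h y (by simp), ih (fun z hz => h z (by simp [hz]))]

-- a stable insertion sort fed in ascending order only ever compares a new element
-- against strictly smaller earlier ones: comparators agreeing on those pairs sort equally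
theorem foldl_insertBy_congr (b1 b2 : Int → Int → Bool) (P : Int → Prop)
    (h : ∀ a c, P a → P c → c < a → b1 a c = b2 a c) :
    ∀ (xs acc : List Int), xs.Pairwise (· < ·) → (∀ x ∈ xs, P x) → (∀ c ∈ acc, P c) →
      (∀ a ∈ xs, ∀ c ∈ acc, c < a) →
      xs.foldl (fun acc x => PySem.List.insertBy b1 x acc) acc
        = xs.foldl (fun acc x => PySem.List.insertBy b2 x acc) acc := by
  intro xs
  induction xs with
  | nil => intro acc _ _ _ _; rfl
  | cons x t ih =>
    intro acc hpw hP hPacc hlt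
    simp only [List.foldl_cons]
    rw [insertBy_congr b1 b2 x acc
      (fun y hy => h x y (hP x (by simp)) (hPacc y hy) (hlt x (by simp) y hy))]
    apply ih
    · exact hpw.of_cons
    · exact fun z hz => hP z (by simp [hz])
    · intro c hc
      rcases (PySem.List.mem_insertBy _ _ _ _).mp hc with rfl | hc'
      · exact hP c (by simp)
      · exact hPacc c hc'
    · intro a ha c hc
      rcases (PySem.List.mem_insertBy _ _ _ _).mp hc with rfl | hc'
      · exact (List.pairwise_cons.mp hpw).1 a ha
      · exact hlt a (by simp [ha]) c hc'

-- A's ranking (stable sort of 1..39 by descending gap) equals B's lexicographic (last_seen, n) sort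
theorem ranked_eq (history : List (List (String × List Int))) :
    (PySem.List.sorted
      ((PySem.List.pyRange 1 40 1).foldl
        (fun sc n => sc.insert n ((history.length : Int) - (aLastSeen history).getD n (-1)))
        PySem.Dict.empty).keys
      (fun x => -(((PySem.List.pyRange 1 40 1).foldl
        (fun sc n => sc.insert n ((history.length : Int) - (aLastSeen history).getD n (-1)))
        PySem.Dict.empty).getD x 0)) false)
    = PySem.List.sorted2 (PySem.List.pyRange 1 40 1)
        (fun n => (bLoop (PySem.List.enumerate history 0).reverse
          (PySem.Set.ofList (PySem.List.pyRange 1 40 1), PySem.Dict.empty)).getD n (-1))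
        (fun n => n) false := by
  obtain ⟨hk, hg⟩ := dictOf_spec
    (fun n => (history.length : Int) - (aLastSeen history).getD n (-1))
    (PySem.List.pyRange 1 40 1) (PySem.List.nodup_pyRange_one 1 40)
  have hB : ∀ n ∈ PySem.List.pyRange 1 40 1,
      (bLoop (PySem.List.enumerate history 0).reverse
        (PySem.Set.ofList (PySem.List.pyRange 1 40 1), PySem.Dict.empty)).get? n
      = (aLastSeen history).get? n := by
    intro n hn
    rw [bLoop_get?]
    have hc : PySem.Set.contains (PySem.Set.ofList (PySem.List.pyRange 1 40 1)) n = true :=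
      (PySem.Set.contains_iff _ _).mpr ((PySem.Set.mem_ofList _ _).mpr hn)
    rw [if_pos hc, PySem.Dict.get?_empty]
    simp
  have hG : ∀ n ∈ PySem.List.pyRange 1 40 1,
      (bLoop (PySem.List.enumerate history 0).reverse
        (PySem.Set.ofList (PySem.List.pyRange 1 40 1), PySem.Dict.empty)).getD n (-1)
      = (aLastSeen history).getD n (-1) := by
    intro n hn
    rw [PySem.Dict.getD_eq_get?_getD, PySem.Dict.getD_eq_get?_getD, hB n hn]
  have hS : ∀ n ∈ PySem.List.pyRange 1 40 1,
      ((PySem.List.pyRange 1 40 1).foldl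
        (fun sc n => sc.insert n ((history.length : Int) - (aLastSeen history).getD n (-1)))
        PySem.Dict.empty).getD n 0
      = (history.length : Int) - (aLastSeen history).getD n (-1) := by
    intro n hn
    rw [PySem.Dict.getD_eq_get?_getD, hg n, if_pos hn]
    rfl
  rw [hk, PySem.List.sorted_eq_foldl_insertBy]
  have hrhs : PySem.List.sorted2 (PySem.List.pyRange 1 40 1)
        (fun n => (bLoop (PySem.List.enumerate history 0).reverse
          (PySem.Set.ofList (PySem.List.pyRange 1 40 1), PySem.Dict.empty)).getD n (-1))
        (fun n => n) false
      = (PySem.List.pyRange 1 40 1).foldl (fun acc x => PySem.List.insertBy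
          (fun a b =>
            decide ((bLoop (PySem.List.enumerate history 0).reverse
              (PySem.Set.ofList (PySem.List.pyRange 1 40 1), PySem.Dict.empty)).getD a (-1)
              < (bLoop (PySem.List.enumerate history 0).reverse
              (PySem.Set.ofList (PySem.List.pyRange 1 40 1), PySem.Dict.empty)).getD b (-1))
            || (!decide ((bLoop (PySem.List.enumerate history 0).reverse
              (PySem.Set.ofList (PySem.List.pyRange 1 40 1), PySem.Dict.empty)).getD b (-1)
              < (bLoop (PySem.List.enumerate history 0).reverse
              (PySem.Set.ofList (PySem.List.pyRange 1 40 1), PySem.Dict.empty)).getD a (-1))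
              && decide (a < b))) x acc) [] := rfl
  rw [hrhs]
  apply foldl_insertBy_congr _ _ (fun n => n ∈ PySem.List.pyRange 1 40 1)
  · intro a c ha hc hlt
    have hda := hS a ha
    have hdc := hS c hc
    have hga := hG a ha
    have hgc := hG c hc
    rw [hda, hdc, hga, hgc]
    have hac : decide (a < c) = false := decide_eq_false (by omega)
    rw [hac]
    simp only [Bool.and_false, Bool.or_false]
    apply decide_eq_decide.mpr
    omega
  · exact PySem.List.pairwise_lt_pyRange_one 1 40
  · exact fun x hx => hx
  · simp
  · simp

-- ===== VERDICT (by name: the statement is the Claim_ definition above) =====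
theorem feat_gap_spec : Claim_equal_feat_gap := by
  intro history k _ _
  exact congrArg (fun r => PySem.List.sorted (PySem.List.slice r none (some k)) (fun x => x) false)
    (ranked_eq history)
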